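-- pv_equiv track=rewrite | github.com/Justcats12/lang | interpreter.py | replaceSpaces
-- ===== SOURCE A (Python) =====
-- def replaceSpaces(text):
--     oldText = text
--     newtext = ""
--     inBrackets = False
--     for c in oldText:
--         if c == "\"":
--             inBrackets = not inBrackets
--
--         if inBrackets and c == " ":
--             newtext += "_"
--         else:
--             newtext += c
--
--     return newtext
-- ===== SOURCE B (Python) =====
-- def replaceSpaces(text):
--     parts = text.split('"')
--     return '"'.join(p.replace(' ', '_') if i % 2 == 1 else p
--                     for i, p in enumerate(parts))
-- ===== Notes on version B (the rewrite author's own statement) =====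
-- stated objective: idiomatic
-- what changed: Replaced the stateful char-by-char quote-toggle scan with: split the text on the quote character, replace spaces only in odd-indexed segments, and rejoin with quotes; segment operations run in C-level str.split/str.replace instead of a per-character Python loop with string concatenation.
import Mathlib
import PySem

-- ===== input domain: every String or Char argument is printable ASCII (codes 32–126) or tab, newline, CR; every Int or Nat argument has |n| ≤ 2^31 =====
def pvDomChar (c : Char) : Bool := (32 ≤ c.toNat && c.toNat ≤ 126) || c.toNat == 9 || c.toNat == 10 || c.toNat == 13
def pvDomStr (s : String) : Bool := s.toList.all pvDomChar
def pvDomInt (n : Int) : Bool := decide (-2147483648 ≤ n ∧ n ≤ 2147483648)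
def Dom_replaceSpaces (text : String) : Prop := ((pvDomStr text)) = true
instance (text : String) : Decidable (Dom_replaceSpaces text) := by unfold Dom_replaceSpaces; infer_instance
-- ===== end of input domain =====

-- B replaces the char-by-char quote-toggle scan by split-on-'"' / map over odd segments / rejoin (idiomatic decomposition, same cost).

-- ===== PORT A =====
def replaceSpaces (text : String) : String :=
  String.ofList
    (text.toList.foldl
      (fun (st : Bool × List Char) c =>
        let inB := if c = '"' then !st.1 else st.1
        (inB, st.2 ++ [if inB && c == ' ' then '_' else c]))
      (false, [])).2

-- ===== PORT B =====
def replaceSpaces_alt (text : String) : String :=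
  String.ofList
    (PySem.Chars.join ['"']
      ((PySem.List.enumerate (PySem.Chars.splitOn text.toList ['"'])).map (fun ip =>
        if PySem.Int.mod ip.1 2 == 1 then PySem.Chars.replace ip.2 [' '] ['_'] else ip.2)))

-- ===== PRECONDITION & SPEC =====
def Spec_replaceSpaces (text : String) (out : String) : Prop := out = replaceSpaces_alt text
instance (text : String) (out : String) : Decidable (Spec_replaceSpaces text out) := by unfold Spec_replaceSpaces; infer_instance

-- ===== CLAIM (what is proved, stated in full; the proofs are below) =====
def Claim_equal_replaceSpaces : Prop := ∀ (text : String), Dom_replaceSpaces text → Spec_replaceSpaces text (replaceSpaces text)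

-- ===== LEMMAS AND PROOFS =====

/-- The single-char substitution ' ' ↦ '_'. -/
def pvR (c : Char) : Char := if c = ' ' then '_' else c

/-- A's loop as a pure recursion (state = inBrackets). -/
def pvAGo : Bool → List Char → List Char
  | _, [] => []
  | b, c :: cs =>
    let b' := if c = '"' then !b else b
    (if b' && c == ' ' then '_' else c) :: pvAGo b' cs

/-- Split on '"', structurally (Python's str.split('"') on char lists). -/
def pvSplitQ : List Char → List (List Char)
  | [] => [[]]
  | c :: cs =>
    if c = '"' then [] :: pvSplitQ cs
    else
      match pvSplitQ cs with
      | [] => [[c]]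
      | p :: ps => (c :: p) :: ps

/-- Rejoin the segments with '"', mapping pvR over the segments whose parity flag is true. -/
def pvRender : Bool → List (List Char) → List Char
  | _, [] => []
  | b, p :: ps =>
    (if b then p.map pvR else p) ++ (if ps.isEmpty then [] else '"' :: pvRender (!b) ps)

def pvModHead (pre : List Char) : List (List Char) → List (List Char)
  | [] => [pre]
  | p :: ps => (pre ++ p) :: ps

theorem pvSplitQ_ne_nil (cs : List Char) : pvSplitQ cs ≠ [] := by
  cases cs with
  | nil => simp [pvSplitQ]
  | cons c cs =>
    simp only [pvSplitQ]
    split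
    · simp
    · cases pvSplitQ cs <;> simp

theorem pvFoldl_snd (cs : List Char) (b : Bool) (acc : List Char) :
    (cs.foldl
      (fun (st : Bool × List Char) c =>
        let inB := if c = '"' then !st.1 else st.1
        (inB, st.2 ++ [if inB && c == ' ' then '_' else c]))
      (b, acc)).2 = acc ++ pvAGo b cs := by
  induction cs generalizing b acc with
  | nil => simp [pvAGo]
  | cons c cs ih =>
    simp only [List.foldl_cons]
    rw [ih]
    cases b <;> by_cases hq : c = '"' <;> simp [pvAGo, hq, List.append_assoc]

theorem pvAGo_render (cs : List Char) (b : Bool) :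
    pvAGo b cs = pvRender b (pvSplitQ cs) := by
  induction cs generalizing b with
  | nil => simp [pvAGo, pvSplitQ, pvRender]
  | cons c cs ih =>
    obtain ⟨p, ps, hps⟩ := List.exists_cons_of_ne_nil (pvSplitQ_ne_nil cs)
    by_cases hc : c = '"'
    · subst hc
      have h1 : pvAGo b ('"' :: cs) = '"' :: pvAGo (!b) cs := by
        cases b <;> simp [pvAGo]
      have h2 : pvSplitQ ('"' :: cs) = [] :: pvSplitQ cs := by simp [pvSplitQ]
      rw [h1, h2, hps]
      cases b <;> simp [pvRender, ih, hps]
    · have hsp : pvSplitQ (c :: cs) = (c :: p) :: ps := by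
        simp [pvSplitQ, hc, hps]
      have hgoal : pvAGo b (c :: cs)
          = (if b then pvR c else c) :: pvAGo b cs := by
        cases b <;> simp [pvAGo, pvR, hc]
      rw [hgoal, ih, hps, hsp]
      cases b <;> cases ps <;> simp [pvRender, pvR]

theorem pvSplitOn_go (fuel : Nat) (l cur : List Char) (acc : List (List Char))
    (h : l.length < fuel) :
    PySem.Chars.splitOn.go ['"'] fuel l cur acc
      = acc.reverse ++ pvModHead cur.reverse (pvSplitQ l) := by
  induction fuel generalizing l cur acc with
  | zero => omega
  | succ n ih =>
    cases l with
    | nil => simp [PySem.Chars.splitOn.go, pvSplitQ, pvModHead]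
    | cons c rest =>
      by_cases hc : c = '"'
      · subst hc
        obtain ⟨p, ps, hps⟩ := List.exists_cons_of_ne_nil (pvSplitQ_ne_nil rest)
        have hstep : PySem.Chars.splitOn.go ['"'] (n+1) ('"' :: rest) cur acc
            = PySem.Chars.splitOn.go ['"'] n rest [] (cur.reverse :: acc) := by
          simp [PySem.Chars.splitOn.go, List.isPrefixOf]
        rw [hstep, ih _ _ _ (by simpa using Nat.lt_of_succ_lt_succ h)]
        simp [pvSplitQ, pvModHead, hps]
      · have hpre : List.isPrefixOf ['"'] (c :: rest) = false := by
          simp [List.isPrefixOf]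
          exact fun h' => hc h'.symm
        have hstep : PySem.Chars.splitOn.go ['"'] (n+1) (c :: rest) cur acc
            = PySem.Chars.splitOn.go ['"'] n rest (c :: cur) acc := by
          simp [PySem.Chars.splitOn.go, hpre]
        rw [hstep, ih _ _ _ (by simpa using Nat.lt_of_succ_lt_succ h)]
        obtain ⟨p, ps, hps⟩ := List.exists_cons_of_ne_nil (pvSplitQ_ne_nil rest)
        simp [pvSplitQ, hc, hps, pvModHead]

theorem pvSplitOn_eq (cs : List Char) :
    PySem.Chars.splitOn cs ['"'] = pvSplitQ cs := by
  have h := pvSplitOn_go (cs.length + 1) cs [] [] (by omega)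
  obtain ⟨p, ps, hps⟩ := List.exists_cons_of_ne_nil (pvSplitQ_ne_nil cs)
  simpa [PySem.Chars.splitOn, hps, pvModHead] using h

theorem pvReplace_go (fuel : Nat) (l acc : List Char) (h : l.length ≤ fuel) :
    PySem.Chars.replace.go [' '] ['_'] fuel l acc = acc.reverse ++ l.map pvR := by
  induction fuel generalizing l acc with
  | zero =>
    have hl : l = [] := by cases l <;> simp_all
    subst hl
    simp [PySem.Chars.replace.go]
  | succ n ih =>
    cases l with
    | nil => simp [PySem.Chars.replace.go]
    | cons c rest =>
      by_cases hc : c = ' '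
      · subst hc
        have hstep : PySem.Chars.replace.go [' '] ['_'] (n+1) (' ' :: rest) acc
            = PySem.Chars.replace.go [' '] ['_'] n rest ('_' :: acc) := by
          simp [PySem.Chars.replace.go, List.isPrefixOf]
        rw [hstep, ih _ _ (by simpa using Nat.succ_le_succ_iff.mp h)]
        simp [pvR]
      · have hpre : List.isPrefixOf [' '] (c :: rest) = false := by
          simp [List.isPrefixOf]
          exact fun h' => hc h'.symm
        have hstep : PySem.Chars.replace.go [' '] ['_'] (n+1) (c :: rest) acc
            = PySem.Chars.replace.go [' '] ['_'] n rest (c :: acc) := by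
          simp [PySem.Chars.replace.go, hpre]
        rw [hstep, ih _ _ (by simpa using Nat.succ_le_succ_iff.mp h)]
        simp [pvR, hc]

theorem pvReplace_eq (p : List Char) :
    PySem.Chars.replace p [' '] ['_'] = p.map pvR := by
  simpa [PySem.Chars.replace] using pvReplace_go p.length p [] (le_refl _)

theorem pvJoin_enum (parts : List (List Char)) (n : Int) (hn : 0 ≤ n) :
    PySem.Chars.join ['"']
      ((PySem.List.enumerate parts n).map (fun ip =>
        if PySem.Int.mod ip.1 2 == 1 then PySem.Chars.replace ip.2 [' '] ['_'] else ip.2))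
      = pvRender (PySem.Int.mod n 2 == 1) parts := by
  induction parts generalizing n with
  | nil => simp [PySem.List.enumerate, PySem.Chars.join, List.intercalate, pvRender]
  | cons p ps ih =>
    have hflip : (PySem.Int.mod (n + 1) 2 == 1) = !(PySem.Int.mod n 2 == 1) := by
      simp only [PySem.Int.mod_eq_emod_of_pos (show (0:Int) < 2 by omega)]
      rcases Int.emod_two_eq_zero_or_one n with h | h
      · simp [h, show (n + 1) % 2 = 1 by omega]
      · simp [h, show (n + 1) % 2 = 0 by omega]
    cases ps with
    | nil =>
      simp [PySem.List.enumerate, PySem.Chars.join, List.intercalate, pvRender, pvReplace_eq]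
    | cons q qs =>
      have ih' := ih (n + 1) (by omega)
      simp only [PySem.List.enumerate, List.map_cons] at ih' ⊢
      rw [PySem.Chars.join_cons_cons, ih', hflip]
      cases hb : (PySem.Int.mod n 2 == 1) <;>
        simp [pvRender, pvReplace_eq, List.append_assoc]

-- ===== VERDICT (by name: the statement is the Claim_ definition above) =====
theorem replaceSpaces_spec : Claim_equal_replaceSpaces := by
  intro text _
  unfold Spec_replaceSpaces replaceSpaces replaceSpaces_alt
  rw [pvSplitOn_eq, pvFoldl_snd, pvAGo_render,
      pvJoin_enum (pvSplitQ text.toList) 0 (by omega),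
      show (PySem.Int.mod 0 2 == 1) = false from by decide]
  simp
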